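-- pv_equiv track=rewrite | github.com/djova/advent-of-code | 2019/python/12_The_N_Body_Problem.py | run_single_dim_step
-- ===== SOURCE A (Python) =====
-- import itertools
--
-- def apply_gravity(a, b):
--     if a == b:
--         return 0
--     elif a > b:
--         return 1
--     else:
--         return -1
--
-- def run_single_dim_step(pos, vel):
--     planets = range(len(pos))
--     for a, b in itertools.combinations(planets, 2):
--         dv = apply_gravity(pos[b], pos[a])
--         vel[a] = vel[a] + dv
--         vel[b] = vel[b] - dv
--     for p in planets:
--         pos[p] = pos[p] + vel[p]
--     return pos, vel
-- ===== SOURCE B (Python) =====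
-- def run_single_dim_step(pos, vel):
--     # Counting re-implementation: sort the distinct positions once and give every
--     # planet at value x the delta (#greater - #less) via prefix counts, instead of
--     # iterating over all O(n^2) planet pairs.  Mutates pos and vel in place like A.
--     n = len(pos)
--     counts = {}
--     for x in pos:
--         counts[x] = counts.get(x, 0) + 1
--     dv = {}
--     below = 0
--     for x in sorted(counts):
--         c = counts[x]
--         dv[x] = (n - below - c) - below
--         below += c
--     for i in range(n):
--         vel[i] = vel[i] + dv[pos[i]]
--     for i in range(n):
--         pos[i] = pos[i] + vel[i]
--     return pos, vel
-- ===== Notes on version B (the rewrite author's own statement) =====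
-- stated objective: faster
-- what changed: Replaces the O(n^2) loop over all planet pairs by a value-counting scheme: build a count per distinct position, scan the distinct positions in sorted order once to assign each value the delta (#greater - #less) via running prefix counts, then apply the per-value delta to every planet.
import Mathlib
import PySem

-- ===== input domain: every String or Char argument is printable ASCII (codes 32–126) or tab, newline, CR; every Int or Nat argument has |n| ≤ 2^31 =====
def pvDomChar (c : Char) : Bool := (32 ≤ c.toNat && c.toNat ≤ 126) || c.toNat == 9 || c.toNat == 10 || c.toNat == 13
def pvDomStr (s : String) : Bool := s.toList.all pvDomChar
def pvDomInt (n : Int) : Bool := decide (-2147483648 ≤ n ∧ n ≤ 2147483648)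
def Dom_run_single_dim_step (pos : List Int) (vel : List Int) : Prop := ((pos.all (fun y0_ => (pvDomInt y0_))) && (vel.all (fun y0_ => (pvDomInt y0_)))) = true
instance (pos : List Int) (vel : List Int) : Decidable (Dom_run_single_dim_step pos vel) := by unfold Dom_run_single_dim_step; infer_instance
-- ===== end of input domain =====

-- B replaces A's pass over all planet pairs by per-value counting over the sorted
-- distinct positions (objective: faster). Both Pythons mutate pos and vel in place
-- (same final contents); the equivalence proved here is about the returned pair.

-- ===== PORT A =====
def applyGravity (a : Int) (b : Int) : Int :=
  if a = b then 0 else if a > b then 1 else -1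

-- the body of A's 'for a, b in itertools.combinations(planets, 2)' loop
def pairStep (pos : List Int) (v : List Int) (ab : List Nat) : List Int :=
  match ab with
  | [a, b] =>
    let dv := applyGravity (pos.getD b 0) (pos.getD a 0)
    let v := v.set a (v.getD a 0 + dv)
    v.set b (v.getD b 0 - dv)
  | _ => v

def run_single_dim_step (pos : List Int) (vel : List Int) : List Int × List Int :=
  let n := pos.length
  let vel' := (PySem.List.combinations (List.range n) 2).foldl (pairStep pos) vel
  let pos' := (List.range n).foldl (fun p q => p.set q (p.getD q 0 + vel'.getD q 0)) pos
  (pos', vel')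

-- ===== PORT B =====
-- the body of B's 'for x in sorted(counts)' loop; state = (dv, below)
def bStep (nI : Int) (counts : PySem.Dict Int Int)
    (st : PySem.Dict Int Int × Int) (x : Int) : PySem.Dict Int Int × Int :=
  let c := counts.getD x 0
  (st.1.insert x ((nI - st.2 - c) - st.2), st.2 + c)

def run_single_dim_step_alt (pos : List Int) (vel : List Int) : List Int × List Int :=
  let n : Int := pos.length
  let counts := pos.foldl (fun d x => d.insert x (d.getD x 0 + 1)) PySem.Dict.empty
  let st := (PySem.List.sorted counts.keys (fun x => x) false).foldl
    (bStep n counts) (PySem.Dict.empty, 0)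
  let dv := st.1
  let vel' := (List.range pos.length).foldl
    (fun v i => v.set i (v.getD i 0 + dv.getD (pos.getD i 0) 0)) vel
  let pos' := (List.range pos.length).foldl
    (fun p i => p.set i (p.getD i 0 + vel'.getD i 0)) pos
  (pos', vel')

-- ===== PRECONDITION & SPEC =====
-- Pre_ excludes exactly the inputs on which Python A raises IndexError (vel shorter
-- than pos); Python B raises there too.
def Pre_run_single_dim_step (pos : List Int) (vel : List Int) : Prop :=
  pos.length ≤ vel.length
instance (pos : List Int) (vel : List Int) : Decidable (Pre_run_single_dim_step pos vel) := by unfold Pre_run_single_dim_step; infer_instance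

def pvWitness_run_single_dim_step : List Int × List Int := ([3, 1, 2], [0, -1, 4])

def Spec_run_single_dim_step (pos : List Int) (vel : List Int) (out : List Int × List Int) : Prop := out = run_single_dim_step_alt pos vel
instance (pos : List Int) (vel : List Int) (out : List Int × List Int) : Decidable (Spec_run_single_dim_step pos vel out) := by unfold Spec_run_single_dim_step; infer_instance

-- ===== CLAIM (what is proved, stated in full; the proofs are below) =====
def Claim_equal_run_single_dim_step : Prop := ∀ (pos : List Int) (vel : List Int), Dom_run_single_dim_step pos vel → Pre_run_single_dim_step pos vel → Spec_run_single_dim_step pos vel (run_single_dim_step pos vel)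

-- ===== LEMMAS AND PROOFS =====

lemma getD_set_lt (v : List Int) (i : Nat) (a : Int) (h : i < v.length) (k : Nat) :
    (v.set i a).getD k 0 = if k = i then a else v.getD k 0 := by
  simp only [List.getD, List.getElem?_set]
  by_cases hk : k = i <;> simp [hk, h, Ne.symm]

lemma ag_self (a : Int) : applyGravity a a = 0 := by simp [applyGravity]

lemma ag_antisymm (a b : Int) : applyGravity a b = -applyGravity b a := by
  unfold applyGravity
  rcases lt_trichotomy a b with h | h | h <;> split_ifs <;> omega

def tT (pos : List Int) (k : Nat) (c : List Nat) : Int :=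
  match c with
  | [a, b] => (if k = a then applyGravity (pos.getD b 0) (pos.getD a 0) else 0)
            + (if k = b then -applyGravity (pos.getD b 0) (pos.getD a 0) else 0)
  | _ => 0

lemma foldA (pos : List Int) : ∀ (L : List (List Nat)) (v : List Int),
    (∀ c ∈ L, ∃ a b, c = [a, b] ∧ a < b ∧ b < v.length) →
    ((L.foldl (pairStep pos) v).length = v.length ∧
     ∀ k, (L.foldl (pairStep pos) v).getD k 0 = v.getD k 0 + (L.map (tT pos k)).sum) := by
  intro L
  induction L with
  | nil => intro v _; simp
  | cons c L ih =>
    intro v hv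
    obtain ⟨a, b, rfl, hab, hb⟩ := hv _ (List.mem_cons_self)
    have ha : a < v.length := lt_trans hab hb
    have hstep : pairStep pos v [a, b] =
        (v.set a (v.getD a 0 + applyGravity (pos.getD b 0) (pos.getD a 0))).set b
          ((v.set a (v.getD a 0 + applyGravity (pos.getD b 0) (pos.getD a 0))).getD b 0
            - applyGravity (pos.getD b 0) (pos.getD a 0)) := rfl
    have hlen : (pairStep pos v [a, b]).length = v.length := by
      rw [hstep]; simp
    have hget : ∀ k, (pairStep pos v [a, b]).getD k 0 = v.getD k 0 + tT pos k [a, b] := by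
      intro k
      rw [hstep]
      rw [getD_set_lt _ b _ (by simpa using hb), getD_set_lt _ a _ ha,
          getD_set_lt _ a _ ha]
      have hne : b ≠ a := Nat.ne_of_gt hab
      simp only [tT]
      by_cases hkb : k = b <;> by_cases hka : k = a <;>
        simp [hkb, hka, hne] <;> omega
    obtain ⟨ihlen, ihget⟩ := ih (pairStep pos v [a, b]) (by
      intro c hc
      obtain ⟨a', b', rfl, h1, h2⟩ := hv c (List.mem_cons_of_mem _ hc)
      exact ⟨a', b', rfl, h1, by rwa [hlen]⟩)
    constructor
    · simpa [hlen] using ihlen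
    · intro k
      simp only [List.foldl_cons, List.map_cons, List.sum_cons]
      rw [ihget k, hget k]
      ring

lemma comb2_cons {α : Type} (x : α) (xs : List α) :
    PySem.List.combinations (x :: xs) 2 =
      xs.map (fun y => [x, y]) ++ PySem.List.combinations xs 2 := by
  rw [show (2 : Nat) = 1 + 1 from rfl, PySem.List.combinations_cons_succ,
    PySem.List.combinations_one]
  simp [List.map_map]

lemma indicator_sum {α : Type} [DecidableEq α] (g : α → Int) (k : α) :
    ∀ (t : List α), t.Nodup →
      (t.map (fun y => if k = y then g y else 0)).sum = if k ∈ t then g k else 0 := by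
  intro t
  induction t with
  | nil => simp
  | cons y t ih =>
    intro hnd
    obtain ⟨hy, hnd'⟩ := List.nodup_cons.mp hnd
    simp only [List.map_cons, List.sum_cons, ih hnd', List.mem_cons]
    by_cases hk : k = y
    · subst hk
      simp [hy]
    · simp [hk]

lemma sumT (pos : List Int) (k : Nat) : ∀ (xs : List Nat), xs.Nodup →
    ((PySem.List.combinations xs 2).map (tT pos k)).sum =
      if k ∈ xs then (xs.map (fun j => applyGravity (pos.getD j 0) (pos.getD k 0))).sum
      else 0 := by
  intro xs
  induction xs with
  | nil =>
    intro _
    rw [show (2 : Nat) = 1 + 1 from rfl, PySem.List.combinations_nil_succ]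
    simp
  | cons x t ih =>
    intro hnd
    obtain ⟨hx, hnd'⟩ := List.nodup_cons.mp hnd
    rw [comb2_cons, List.map_append, List.sum_append, List.map_map, ih hnd']
    by_cases hk : k = x
    · subst hk
      have hkt : k ∉ t := hx
      have h1 : (t.map (tT pos k ∘ fun y => [k, y])).sum =
          (t.map (fun y => applyGravity (pos.getD y 0) (pos.getD k 0))).sum := by
        apply congrArg
        apply List.map_congr_left
        intro y hy
        have : k ≠ y := fun h => hkt (h ▸ hy)
        simp [tT, Function.comp, this]
      rw [h1]
      simp [hkt, ag_self]
    · have h1 : (t.map (tT pos k ∘ fun y => [x, y])) =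
          t.map (fun y => if k = y then -(applyGravity (pos.getD y 0) (pos.getD x 0)) else 0) := by
        apply List.map_congr_left
        intro y hy
        simp [tT, Function.comp, hk]
      rw [h1, indicator_sum _ _ _ hnd']
      by_cases hkt : k ∈ t
      · simp only [hkt, if_true, List.mem_cons, hk, false_or, List.map_cons, List.sum_cons]
        rw [ag_antisymm (pos.getD x 0) (pos.getD k 0)]
      · simp [hkt, hk]

lemma map_range_getD (l : List Int) (g : Int → Int) :
    (List.range l.length).map (fun j => g (l.getD j 0)) = l.map g := by
  apply List.ext_getElem
  · simp
  · intro i h1 h2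
    simp only [List.getElem_map, List.getElem_range]
    rw [List.getD_eq_getElem _ _ (by simpa using h2)]

lemma sum_ag (x : Int) : ∀ (l : List Int),
    (l.map (fun y => applyGravity y x)).sum =
      (l.countP (fun y => decide (x < y)) : Int) - (l.countP (fun y => decide (y < x)) : Int) := by
  intro l
  induction l with
  | nil => simp
  | cons y l ih =>
    rw [List.map_cons, List.sum_cons, ih, List.countP_cons, List.countP_cons]
    unfold applyGravity
    rcases lt_trichotomy y x with h | h | h
    · rw [if_neg (ne_of_lt h), if_neg (by omega : ¬ y > x),
        if_neg (by simp [not_lt.mpr h.le] : ¬ (decide (x < y) = true)),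
        if_pos (by simp [h] : decide (y < x) = true)]
      push_cast; ring
    · subst h
      rw [if_pos rfl]
      simp only [decide_eq_true_eq, lt_irrefl, if_false]
      push_cast; ring
    · rw [if_neg (ne_of_gt h), if_pos (by omega : y > x),
        if_pos (by simp [h] : decide (x < y) = true),
        if_neg (by simp [not_lt.mpr h.le] : ¬ (decide (y < x) = true))]
      push_cast; ring

def velDelta (pos : List Int) (x : Int) : Int :=
  (pos.countP (fun y => decide (x < y)) : Int) - (pos.countP (fun y => decide (y < x)) : Int)

lemma velA (pos vel : List Int) (h : pos.length ≤ vel.length) :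
    (((PySem.List.combinations (List.range pos.length) 2).foldl (pairStep pos) vel).length
        = vel.length) ∧
    ∀ k, ((PySem.List.combinations (List.range pos.length) 2).foldl (pairStep pos) vel).getD k 0
        = vel.getD k 0 + (if k < pos.length then velDelta pos (pos.getD k 0) else 0) := by
  obtain ⟨hlen, hget⟩ := foldA pos (PySem.List.combinations (List.range pos.length) 2) vel (by
    intro c hc
    obtain ⟨hsub, hlen2⟩ := (PySem.List.mem_combinations_iff _ _ _).mp hc
    have hpw : c.Pairwise (· < ·) := (List.pairwise_lt_range).sublist hsub
    have hmem : ∀ i ∈ c, i < pos.length := by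
      intro i hi
      exact List.mem_range.mp (hsub.subset hi)
    match c, hlen2 with
    | [a, b], _ =>
      refine ⟨a, b, rfl, ?_, ?_⟩
      · simpa using hpw
      · exact lt_of_lt_of_le (hmem b (by simp)) h)
  refine ⟨hlen, fun k => ?_⟩
  rw [hget k, sumT pos k (List.range pos.length) List.nodup_range]
  by_cases hk : k < pos.length
  · rw [if_pos (List.mem_range.mpr hk), if_pos hk,
      map_range_getD pos (fun y => applyGravity y (pos.getD k 0)), sum_ag]
    rfl
  · rw [if_neg (by simpa using hk), if_neg hk]

lemma foldSet (g : Nat → Int) : ∀ (n : Nat) (v : List Int), n ≤ v.length →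
    (((List.range n).foldl (fun v i => v.set i (v.getD i 0 + g i)) v).length = v.length ∧
     ∀ k, ((List.range n).foldl (fun v i => v.set i (v.getD i 0 + g i)) v).getD k 0 =
        if k < n then v.getD k 0 + g k else v.getD k 0) := by
  intro n
  induction n with
  | zero => intro v _; simp
  | succ n ih =>
    intro v hn
    obtain ⟨ihlen, ihget⟩ := ih v (le_of_lt (Nat.lt_of_succ_le hn))
    rw [List.range_succ, List.foldl_append, List.foldl_cons, List.foldl_nil]
    have hnv : n < ((List.range n).foldl (fun v i => v.set i (v.getD i 0 + g i)) v).length := by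
      rw [ihlen]; omega
    constructor
    · rw [List.length_set, ihlen]
    · intro k
      rw [getD_set_lt _ n _ hnv k, ihget n, if_neg (lt_irrefl n)]
      by_cases hk : k = n
      · subst hk; simp
      · rw [if_neg hk, ihget k]
        by_cases h1 : k < n
        · rw [if_pos h1, if_pos (by omega)]
        · rw [if_neg h1, if_neg (by omega)]


def preSum (counts : PySem.Dict Int Int) (rest : List Int) (x : Int) : Int :=
  ((rest.filter (fun y => decide (y < x))).map (fun y => counts.getD y 0)).sum

lemma bKeep (nI : Int) (counts : PySem.Dict Int Int) :
    ∀ (rest : List Int) (p : PySem.Dict Int Int × Int) (x : Int), x ∉ rest →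
      ((rest.foldl (bStep nI counts) p).1).getD x 0 = (p.1).getD x 0 := by
  intro rest
  induction rest with
  | nil => intro p x _; rfl
  | cons z r ih =>
    intro p x hx
    rw [List.foldl_cons, ih _ x (fun h => hx (List.mem_cons_of_mem _ h))]
    exact PySem.Dict.getD_insert_of_ne _ _ _ (fun h => hx (h ▸ List.mem_cons_self))

lemma bFold (nI : Int) (counts : PySem.Dict Int Int) :
    ∀ (rest : List Int), rest.Pairwise (· < ·) →
      ∀ (d : PySem.Dict Int Int) (b : Int) (x : Int), x ∈ rest →
        ((rest.foldl (bStep nI counts) (d, b)).1).getD x 0 =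
          (nI - (b + preSum counts rest x) - counts.getD x 0) - (b + preSum counts rest x) := by
  intro rest
  induction rest with
  | nil => intro _ _ _ x hx; exact absurd hx (List.not_mem_nil)
  | cons z r ih =>
    intro hpw d b x hx
    obtain ⟨hz, hr⟩ := List.pairwise_cons.mp hpw
    rw [List.foldl_cons]
    rcases List.mem_cons.mp hx with rfl | hxr
    · have hzr : x ∉ r := fun h => lt_irrefl x (hz x h)
      rw [bKeep nI counts r _ x hzr]
      show (d.insert x _).getD x 0 = _
      rw [PySem.Dict.getD_insert_self]
      have hpre : preSum counts (x :: r) x = 0 := by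
        unfold preSum
        rw [List.filter_cons_of_neg (by simp), List.filter_eq_nil_iff.mpr
          (fun y hy => by simpa using not_lt.mpr (hz y hy).le)]
        simp
      rw [hpre]; ring
    · have hzx : z < x := hz x hxr
      rw [show (bStep nI counts (d, b) z) =
        (d.insert z ((nI - b - counts.getD z 0) - b), b + counts.getD z 0) from rfl]
      rw [ih hr _ _ x hxr]
      have hpre : preSum counts (z :: r) x = counts.getD z 0 + preSum counts r x := by
        unfold preSum
        rw [List.filter_cons_of_pos (by simpa using hzx)]
        simp
      rw [hpre]; ring

lemma count_pre (x : Int) (ks : List Int) (hnd : ks.Nodup) :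
    ∀ (p : List Int), (∀ y ∈ p, y ∈ ks) →
      ((ks.filter (fun y => decide (y < x))).map (fun y => (p.count y : Int))).sum =
        (p.countP (fun y => decide (y < x)) : Int) := by
  intro p
  induction p with
  | nil => simp
  | cons z p' ih =>
    intro hp
    have hz : z ∈ ks := hp z List.mem_cons_self
    have hp' : ∀ y ∈ p', y ∈ ks := fun y hy => hp y (List.mem_cons_of_mem _ hy)
    have hmap : (ks.filter (fun y => decide (y < x))).map (fun y => ((z :: p').count y : Int)) =
        (ks.filter (fun y => decide (y < x))).map
          (fun y => (p'.count y : Int) + (if y = z then 1 else 0)) := by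
      apply List.map_congr_left
      intro y _
      rw [List.count_cons]
      by_cases hyz : y = z
      · subst hyz; simp
      · simp [hyz, Ne.symm hyz]
    have hswap : (ks.filter (fun y => decide (y < x))).map (fun y => if y = z then (1:Int) else 0) =
        (ks.filter (fun y => decide (y < x))).map (fun y => if z = y then (1:Int) else 0) := by
      simp only [eq_comm]
    rw [hmap, PySem.List.sum_map_add_int, ih hp', hswap,
      indicator_sum (fun _ => (1 : Int)) z _ (hnd.filter _), List.countP_cons]
    by_cases hzx : z < x
    · rw [if_pos (List.mem_filter.mpr ⟨hz, by simpa using hzx⟩), if_pos (by simpa using hzx)]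
      push_cast; ring
    · rw [if_neg (fun hin => hzx (by simpa using (List.mem_filter.mp hin).2)),
        if_neg (by simpa using hzx)]
      push_cast; ring

lemma tri (x : Int) : ∀ (l : List Int),
    (l.countP (fun y => decide (y < x)) : Int) + l.count x
      + l.countP (fun y => decide (x < y)) = l.length := by
  intro l
  induction l with
  | nil => simp
  | cons z l ih =>
    rw [List.countP_cons, List.countP_cons, List.count_cons, List.length_cons]
    simp only [decide_eq_true_eq, beq_iff_eq]
    push_cast
    push_cast at ih
    split_ifs <;> omega

lemma dvB (pos : List Int) (x : Int) (hx : x ∈ pos) :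
    (((PySem.List.sorted (PySem.Dict.counter pos).keys (fun x => x) false).foldl
        (bStep (pos.length : Int) (PySem.Dict.counter pos)) (PySem.Dict.empty, 0)).1).getD x 0
      = velDelta pos x := by
  set counts := PySem.Dict.counter pos with hc
  set ks := PySem.List.sorted counts.keys (fun x => x) false with hks
  have hperm : ks.Perm counts.keys := PySem.List.sorted_perm _ _ _
  have hnd : ks.Nodup := hperm.nodup_iff.mpr (PySem.Dict.nodup_keys_counter pos)
  have hle : ks.Pairwise (fun a b => a ≤ b) := PySem.List.sorted_pairwise _ _
  have hlt : ks.Pairwise (· < ·) :=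
    (hle.and hnd).imp (fun h => lt_of_le_of_ne h.1 h.2)
  have hmem : ∀ y, y ∈ ks ↔ y ∈ pos := by
    intro y
    rw [hks, PySem.List.mem_sorted, hc, PySem.Dict.keys_counter, PySem.Set.mem_ofList]
  have hxks : x ∈ ks := (hmem x).mpr hx
  rw [bFold _ _ ks hlt _ _ x hxks]
  have hpre : preSum counts ks x = (pos.countP (fun y => decide (y < x)) : Int) := by
    unfold preSum
    have : (ks.filter (fun y => decide (y < x))).map (fun y => counts.getD y 0) =
        (ks.filter (fun y => decide (y < x))).map (fun y => (pos.count y : Int)) := by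
      apply List.map_congr_left
      intro y _
      rw [hc, PySem.Dict.getD_counter]
    rw [this, count_pre x ks hnd pos (fun y hy => (hmem y).mpr hy)]
  rw [hpre, hc, PySem.Dict.getD_counter]
  unfold velDelta
  have htri := tri x pos
  omega

lemma ports_agree (pos vel : List Int) (hpre : pos.length ≤ vel.length) :
    run_single_dim_step pos vel = run_single_dim_step_alt pos vel := by
  simp only [run_single_dim_step, run_single_dim_step_alt,
    PySem.Dict.foldl_insert_getD_add_one_eq_counter]
  set dvT := ((PySem.List.sorted (PySem.Dict.counter pos).keys (fun x => x) false).foldl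
    (bStep (pos.length : Int) (PySem.Dict.counter pos)) (PySem.Dict.empty, 0)).1 with hdvT
  have hdv : ∀ i, i < pos.length → dvT.getD (pos.getD i 0) 0 = velDelta pos (pos.getD i 0) := by
    intro i hi
    apply dvB
    rw [List.getD_eq_getElem _ _ hi]
    exact List.getElem_mem hi
  obtain ⟨hAlen, hAget⟩ := velA pos vel hpre
  obtain ⟨hBlen, hBget⟩ := foldSet (fun i => dvT.getD (pos.getD i 0) 0) pos.length vel hpre
  have velEq : (PySem.List.combinations (List.range pos.length) 2).foldl (pairStep pos) vel =
      (List.range pos.length).foldl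
        (fun v i => v.set i (v.getD i 0 + dvT.getD (pos.getD i 0) 0)) vel := by
    apply List.ext_getElem (by rw [hAlen, hBlen])
    intro i h1 h2
    rw [← List.getD_eq_getElem _ 0 h1, ← List.getD_eq_getElem _ 0 h2, hAget, hBget]
    by_cases hi : i < pos.length
    · rw [if_pos hi, if_pos hi, hdv i hi]
    · rw [if_neg hi, if_neg hi, add_zero]
  rw [velEq]

-- ===== VERDICT (by name: the statement is the Claim_ definition above) =====
theorem run_single_dim_step_spec : Claim_equal_run_single_dim_step := by
  intro pos vel _ hpre
  unfold Spec_run_single_dim_step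
  exact ports_agree pos vel hpre
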